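-- pv_equiv track=rewrite | github.com/DenisK00900/MDP_prs | 6/SB/SB.py | map_get_affected_cells
-- ===== SOURCE A (Python) =====
-- def map_get_affected_cells(bmap, length, ix, iy, iz, ir):
--     map_depth = len(bmap)
--     map_height = len(bmap[0]) if map_depth > 0 else 0
--     map_width = len(bmap[0][0]) if map_height > 0 else 0
--
--     affected_cells = []
--
--     for i in range(length):
--         if ir == 0:
--             x, y, z = ix + i, iy, iz
--         elif ir == 1:
--             x, y, z = ix - i, iy, iz
--         elif ir == 2:
--             x, y, z = ix, iy + i, iz
--         elif ir == 3:
--             x, y, z = ix, iy - i, iz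
--         elif ir == 4:
--             x, y, z = ix, iy, iz + i
--         elif ir == 5:
--             x, y, z = ix, iy, iz - i
--         else:
--             return []
--
--         if (x < 0 or x >= map_width or
--             y < 0 or y >= map_height or
--             z < 0 or z >= map_depth):
--                 return affected_cells
--
--
--         affected_cells.append((x, y, z))
--
--     return affected_cells
-- ===== SOURCE B (Python) =====
-- def map_get_affected_cells(bmap, length, ix, iy, iz, ir):
--     depth = len(bmap)
--     height = len(bmap[0]) if depth > 0 else 0
--     width = len(bmap[0][0]) if height > 0 else 0
--     if ir < 0 or ir > 5:
--         return []
--     axis = ir // 2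
--     start, dim = ((ix, width), (iy, height), (iz, depth))[axis]
--     fixed_ok = ((0 <= iy < height and 0 <= iz < depth),
--                 (0 <= ix < width and 0 <= iz < depth),
--                 (0 <= ix < width and 0 <= iy < height))[axis]
--     if not fixed_ok or not (0 <= start < dim):
--         return []
--     if ir % 2 == 0:
--         n = max(min(length, dim - start), 0)
--         coords = range(start, start + n)
--     else:
--         n = max(min(length, start + 1), 0)
--         coords = range(start, start - n, -1)
--     if axis == 0:
--         return [(v, iy, iz) for v in coords]
--     if axis == 1:
--         return [(ix, v, iz) for v in coords]
--     return [(ix, iy, v) for v in coords]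
-- ===== Notes on version B (the rewrite author's own statement) =====
-- stated objective: simpler
-- what changed: Replaces the per-step bounds-test loop with early returns by up-front validation of the fixed coordinates plus a closed-form min/max count of in-bounds steps and a single range pass per axis.
import Mathlib
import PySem

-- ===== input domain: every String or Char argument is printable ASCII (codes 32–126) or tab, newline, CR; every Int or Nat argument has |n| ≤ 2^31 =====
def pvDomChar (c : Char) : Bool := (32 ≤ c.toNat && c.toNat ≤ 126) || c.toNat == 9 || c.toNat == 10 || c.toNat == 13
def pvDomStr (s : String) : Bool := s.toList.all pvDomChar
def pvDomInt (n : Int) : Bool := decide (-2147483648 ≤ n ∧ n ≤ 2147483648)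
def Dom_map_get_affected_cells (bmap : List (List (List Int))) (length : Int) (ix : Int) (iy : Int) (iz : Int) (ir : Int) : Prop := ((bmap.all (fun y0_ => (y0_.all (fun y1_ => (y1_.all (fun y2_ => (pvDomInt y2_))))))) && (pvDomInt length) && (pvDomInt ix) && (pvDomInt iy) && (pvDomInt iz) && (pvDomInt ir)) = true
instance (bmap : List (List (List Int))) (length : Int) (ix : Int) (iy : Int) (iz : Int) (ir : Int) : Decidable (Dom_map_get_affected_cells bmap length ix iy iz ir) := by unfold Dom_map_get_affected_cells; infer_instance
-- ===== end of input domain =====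

-- B replaces A's per-step bounds-test loop (with early returns) by up-front validation of the
-- fixed coordinates and a closed-form min/max count of in-bounds steps plus one range pass: simpler.

-- the three dimension reads both sources perform (len(bmap), len(bmap[0]) if …, len(bmap[0][0]) if …)
def pvDims (bmap : List (List (List Int))) : Int × Int × Int :=
  let depth : Int := bmap.length
  let height : Int := if 0 < depth then (match bmap with | p :: _ => (p.length : Int) | [] => 0) else 0
  let width : Int := if 0 < height then (match bmap with | p :: _ => (match p with | r :: _ => (r.length : Int) | [] => 0) | [] => 0) else 0
  (depth, height, width)

-- ===== PORT A =====
-- the for-loop of A: processes the remaining range values, carrying the accumulator;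
-- the inner Option encodes the if/elif chain selecting (x, y, z) (none = the final `else: return []`)
def pvLoopA (W H D ix iy iz ir : Int) : List Int → List (Int × Int × Int) → List (Int × Int × Int)
  | [], acc => acc
  | i :: rest, acc =>
    let xyz? : Option (Int × Int × Int) :=
      if ir = 0 then some (ix + i, iy, iz)
      else if ir = 1 then some (ix - i, iy, iz)
      else if ir = 2 then some (ix, iy + i, iz)
      else if ir = 3 then some (ix, iy - i, iz)
      else if ir = 4 then some (ix, iy, iz + i)
      else if ir = 5 then some (ix, iy, iz - i)
      else none
    match xyz? with
    | none => []
    | some (x, y, z) =>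
      if x < 0 ∨ W ≤ x ∨ y < 0 ∨ H ≤ y ∨ z < 0 ∨ D ≤ z then acc
      else pvLoopA W H D ix iy iz ir rest (acc ++ [(x, y, z)])

def map_get_affected_cells (bmap : List (List (List Int))) (length : Int) (ix : Int) (iy : Int) (iz : Int) (ir : Int) : List (Int × Int × Int) :=
  let dims := pvDims bmap
  pvLoopA dims.2.2 dims.2.1 dims.1 ix iy iz ir (PySem.List.pyRange 0 length 1) []

-- ===== PORT B =====
def map_get_affected_cells_alt (bmap : List (List (List Int))) (length : Int) (ix : Int) (iy : Int) (iz : Int) (ir : Int) : List (Int × Int × Int) :=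
  let depth : Int := (pvDims bmap).1
  let height : Int := (pvDims bmap).2.1
  let width : Int := (pvDims bmap).2.2
  if ir < 0 ∨ 5 < ir then []
  else
    let axis : Int := PySem.Int.floordiv ir 2
    let sd : Int × Int := if axis = 0 then (ix, width) else if axis = 1 then (iy, height) else (iz, depth)
    let start := sd.1
    let dim := sd.2
    let fixedOk : Bool :=
      if axis = 0 then decide (0 ≤ iy ∧ iy < height) && decide (0 ≤ iz ∧ iz < depth)
      else if axis = 1 then decide (0 ≤ ix ∧ ix < width) && decide (0 ≤ iz ∧ iz < depth)
      else decide (0 ≤ ix ∧ ix < width) && decide (0 ≤ iy ∧ iy < height)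
    if fixedOk = false ∨ start < 0 ∨ dim ≤ start then []
    else
      let coords : List Int :=
        if PySem.Int.mod ir 2 = 0 then
          PySem.List.pyRange start (start + max (min length (dim - start)) 0) 1
        else
          PySem.List.pyRange start (start - max (min length (start + 1)) 0) (-1)
      if axis = 0 then coords.map (fun v => (v, iy, iz))
      else if axis = 1 then coords.map (fun v => (ix, v, iz))
      else coords.map (fun v => (ix, iy, v))

-- ===== PRECONDITION & SPEC =====
def Spec_map_get_affected_cells (bmap : List (List (List Int))) (length : Int) (ix : Int) (iy : Int) (iz : Int) (ir : Int) (out : List (Int × Int × Int)) : Prop := out = map_get_affected_cells_alt bmap length ix iy iz ir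
instance (bmap : List (List (List Int))) (length : Int) (ix : Int) (iy : Int) (iz : Int) (ir : Int) (out : List (Int × Int × Int)) : Decidable (Spec_map_get_affected_cells bmap length ix iy iz ir out) := by unfold Spec_map_get_affected_cells; infer_instance

-- ===== CLAIM (what is proved, stated in full; the proofs are below) =====
def Claim_equal_map_get_affected_cells : Prop := ∀ (bmap : List (List (List Int))) (length : Int) (ix : Int) (iy : Int) (iz : Int) (ir : Int), Dom_map_get_affected_cells bmap length ix iy iz ir → Spec_map_get_affected_cells bmap length ix iy iz ir (map_get_affected_cells bmap length ix iy iz ir)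

-- ===== LEMMAS AND PROOFS =====

-- increasing axis (ir = 0, 2, 4): the loop collects positions base+a, base+a+1, … until the
-- dimension bound (or the range runs out), provided the fixed coordinates are in bounds
theorem pvLoopA_inc (W H D ix iy iz : Int) (ir : Int)
    (mk : Int → Int × Int × Int) (base dim : Int)
    (hsel : ∀ i, (if ir = 0 then some (ix + i, iy, iz)
      else if ir = 1 then some (ix - i, iy, iz)
      else if ir = 2 then some (ix, iy + i, iz)
      else if ir = 3 then some (ix, iy - i, iz)
      else if ir = 4 then some (ix, iy, iz + i)
      else if ir = 5 then some (ix, iy, iz - i)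
      else none) = some (mk (base + i)))
    (htest : ∀ v, ((mk v).1 < 0 ∨ W ≤ (mk v).1 ∨ (mk v).2.1 < 0 ∨ H ≤ (mk v).2.1 ∨ (mk v).2.2 < 0 ∨ D ≤ (mk v).2.2) ↔ (v < 0 ∨ dim ≤ v)) :
    ∀ (n : Nat) (a : Int) (acc), 0 ≤ base + a →
      pvLoopA W H D ix iy iz ir (PySem.List.pyRange a (a + n) 1) acc
        = acc ++ (PySem.List.pyRange (base + a) (min (base + a + n) dim) 1).map mk := by
  intro n
  induction n with
  | zero =>
    intro a acc _
    rw [show a + ((0 : Nat) : Int) = a by omega, PySem.List.pyRange_one_eq_nil le_rfl,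
      PySem.List.pyRange_one_eq_nil (by omega)]
    simp [pvLoopA]
  | succ m ih =>
    intro a acc hpos
    rw [PySem.List.pyRange_one_cons (by omega)]
    simp only [pvLoopA, hsel a]
    by_cases hb : dim ≤ base + a
    · rw [if_pos (by rw [htest]; omega), PySem.List.pyRange_one_eq_nil (by omega)]
      simp
    · rw [if_neg (by rw [htest]; omega)]
      have h1 : a + ((m + 1 : Nat) : Int) = a + 1 + (m : Int) := by push_cast; omega
      rw [h1, ih (a + 1) (acc ++ [mk (base + a)]) (by omega)]
      have h2 : base + (a + 1) = base + a + 1 := by omega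
      have h3 : min (base + a + 1 + (m : Int)) dim = min (base + a + ((m + 1 : Nat) : Int)) dim := by push_cast; omega
      rw [h2, h3, PySem.List.pyRange_one_cons
        (show base + a < min (base + a + ((m + 1 : Nat) : Int)) dim by push_cast; omega)]
      simp

-- decreasing axis (ir = 1, 3, 5): the loop collects positions base-a, base-a-1, … down to 0
theorem pvLoopA_dec (W H D ix iy iz : Int) (ir : Int)
    (mk : Int → Int × Int × Int) (base dim : Int)
    (hsel : ∀ i, (if ir = 0 then some (ix + i, iy, iz)
      else if ir = 1 then some (ix - i, iy, iz)
      else if ir = 2 then some (ix, iy + i, iz)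
      else if ir = 3 then some (ix, iy - i, iz)
      else if ir = 4 then some (ix, iy, iz + i)
      else if ir = 5 then some (ix, iy, iz - i)
      else none) = some (mk (base - i)))
    (htest : ∀ v, ((mk v).1 < 0 ∨ W ≤ (mk v).1 ∨ (mk v).2.1 < 0 ∨ H ≤ (mk v).2.1 ∨ (mk v).2.2 < 0 ∨ D ≤ (mk v).2.2) ↔ (v < 0 ∨ dim ≤ v)) :
    ∀ (n : Nat) (a : Int) (acc), base - a < dim →
      pvLoopA W H D ix iy iz ir (PySem.List.pyRange a (a + n) 1) acc
        = acc ++ (PySem.List.pyRange (base - a) (max (base - a - n) (-1)) (-1)).map mk := by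
  intro n
  induction n with
  | zero =>
    intro a acc _
    rw [show a + ((0 : Nat) : Int) = a by omega, PySem.List.pyRange_one_eq_nil le_rfl,
      PySem.List.pyRange_neg_one_eq_nil (by omega)]
    simp [pvLoopA]
  | succ m ih =>
    intro a acc hlt
    rw [PySem.List.pyRange_one_cons (by omega)]
    simp only [pvLoopA, hsel a]
    by_cases hb : base - a < 0
    · rw [if_pos (by rw [htest]; omega), PySem.List.pyRange_neg_one_eq_nil (by omega)]
      simp
    · rw [if_neg (by rw [htest]; omega)]
      have h1 : a + ((m + 1 : Nat) : Int) = a + 1 + (m : Int) := by push_cast; omega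
      rw [h1, ih (a + 1) (acc ++ [mk (base - a)]) (by omega)]
      have h2 : base - (a + 1) = base - a - 1 := by omega
      have h3 : max (base - a - 1 - (m : Int)) (-1) = max (base - a - ((m + 1 : Nat) : Int)) (-1) := by push_cast; omega
      rw [h2, h3, PySem.List.pyRange_neg_one_cons
        (show max (base - a - ((m + 1 : Nat) : Int)) (-1) < base - a by push_cast; omega)]
      simp

-- when the very first cell (i = 0) is already out of bounds, or the range is empty, A yields []
theorem pvLoopA_nil (W H D ix iy iz ir L : Int) (hL : L ≤ 0) :
    pvLoopA W H D ix iy iz ir (PySem.List.pyRange 0 L 1) [] = [] := by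
  rw [PySem.List.pyRange_one_eq_nil hL]; rfl

-- the loop stops with the accumulator when the very first selected cell is out of bounds
theorem pvLoopA_stop (W H D ix iy iz ir : Int) (rest : List Int) (acc : List (Int × Int × Int)) (x y z : Int)
    (hsel : (if ir = 0 then some (ix + 0, iy, iz)
      else if ir = 1 then some (ix - 0, iy, iz)
      else if ir = 2 then some (ix, iy + 0, iz)
      else if ir = 3 then some (ix, iy - 0, iz)
      else if ir = 4 then some (ix, iy, iz + 0)
      else if ir = 5 then some (ix, iy, iz - 0)
      else none) = some (x, y, z))
    (hbad : x < 0 ∨ W ≤ x ∨ y < 0 ∨ H ≤ y ∨ z < 0 ∨ D ≤ z) :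
    pvLoopA W H D ix iy iz ir (0 :: rest) acc = acc := by
  simp only [pvLoopA, hsel]
  rw [if_pos hbad]

-- ===== VERDICT (by name: the statement is the Claim_ definition above) =====
theorem map_get_affected_cells_spec : Claim_equal_map_get_affected_cells := by
  intro bmap L ix iy iz ir _
  unfold Spec_map_get_affected_cells map_get_affected_cells map_get_affected_cells_alt
  obtain ⟨D, H, W⟩ : Int × Int × Int := pvDims bmap
  -- dispatch ir ∉ [0, 5]
  by_cases hout : ir < 0 ∨ 5 < ir
  · rw [if_pos hout]
    by_cases hL : L ≤ 0
    · exact pvLoopA_nil _ _ _ _ _ _ _ _ hL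
    · rw [PySem.List.pyRange_one_cons (by omega)]
      simp only [pvLoopA]
      rw [if_neg (by omega), if_neg (by omega), if_neg (by omega),
        if_neg (by omega), if_neg (by omega), if_neg (by omega)]
  · rw [if_neg hout]
    rw [not_or, not_lt, not_lt] at hout
    -- the six direction cases; each: bad-start/fixed subcase gives [], good subcase uses the loop lemma
    have main : ∀ (base dim : Int) (mk : Int → Int × Int × Int),
        (∀ i, (if ir = 0 then some (ix + i, iy, iz)
          else if ir = 1 then some (ix - i, iy, iz)
          else if ir = 2 then some (ix, iy + i, iz)
          else if ir = 3 then some (ix, iy - i, iz)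
          else if ir = 4 then some (ix, iy, iz + i)
          else if ir = 5 then some (ix, iy, iz - i)
          else none) = some (mk ((if PySem.Int.mod ir 2 = 0 then base + i else base - i)))) →
        (∀ v, ((mk v).1 < 0 ∨ W ≤ (mk v).1 ∨ (mk v).2.1 < 0 ∨ H ≤ (mk v).2.1 ∨ (mk v).2.2 < 0 ∨ D ≤ (mk v).2.2) ↔ (v < 0 ∨ dim ≤ v)) →
        pvLoopA W H D ix iy iz ir (PySem.List.pyRange 0 L 1) []
          = (if (0 ≤ base ∧ base < dim : Bool) = false ∨ base < 0 ∨ dim ≤ base then ([] : List (Int × Int × Int))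
             else (if PySem.Int.mod ir 2 = 0 then
                PySem.List.pyRange base (base + max (min L (dim - base)) 0) 1
              else
                PySem.List.pyRange base (base - max (min L (base + 1)) 0) (-1)).map mk) := by
      intro base dim mk hsel htest
      by_cases hgood : 0 ≤ base ∧ base < dim
      · rw [if_neg (by simp only [decide_eq_false_iff_not]; omega)]
        by_cases hL : L ≤ 0
        · rw [pvLoopA_nil _ _ _ _ _ _ _ _ hL]
          have hmax : max (min L (dim - base)) 0 = 0 := by omega
          have hmax' : max (min L (base + 1)) 0 = 0 := by omega
          by_cases hm : PySem.Int.mod ir 2 = 0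
          · rw [if_pos hm, hmax, add_zero, PySem.List.pyRange_one_eq_nil le_rfl]; simp
          · rw [if_neg hm, hmax', sub_zero, PySem.List.pyRange_neg_one_eq_nil le_rfl]; simp
        · by_cases hm : PySem.Int.mod ir 2 = 0
          · simp only [hm, reduceIte] at hsel ⊢
            have heq := pvLoopA_inc W H D ix iy iz ir mk base dim hsel htest L.toNat 0 [] (by omega)
            rw [show (0 : Int) + (L.toNat : Int) = L by omega] at heq
            rw [heq, show min (base + 0 + (L.toNat : Int)) dim = base + max (min L (dim - base)) 0 by omega]
            simp
          · simp only [hm, reduceIte] at hsel ⊢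
            have heq := pvLoopA_dec W H D ix iy iz ir mk base dim hsel htest L.toNat 0 [] (by omega)
            rw [show (0 : Int) + (L.toNat : Int) = L by omega] at heq
            rw [heq, show max (base - 0 - (L.toNat : Int)) (-1) = base - max (min L (base + 1)) 0 by omega]
            simp
      · rw [if_pos (by simp only [decide_eq_false_iff_not]; omega)]
        by_cases hL : L ≤ 0
        · exact pvLoopA_nil _ _ _ _ _ _ _ _ hL
        · rw [PySem.List.pyRange_one_cons (by omega : (0:Int) < L)]
          simp only [pvLoopA, hsel 0]
          rw [if_pos]
          rw [htest]
          rcases (by omega : PySem.Int.mod ir 2 = 0 ∨ ¬ PySem.Int.mod ir 2 = 0) with hm | hm <;>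
            simp only [hm, reduceIte] <;> omega
    -- ir ∈ {0,…,5}: instantiate
    have h6 : ir = 0 ∨ ir = 1 ∨ ir = 2 ∨ ir = 3 ∨ ir = 4 ∨ ir = 5 := by omega
    rcases h6 with h | h | h | h | h | h <;> subst h <;>
      simp only [show PySem.Int.floordiv 0 2 = 0 from rfl, show PySem.Int.floordiv 1 2 = 0 from rfl,
        show PySem.Int.floordiv 2 2 = 1 from rfl, show PySem.Int.floordiv 3 2 = 1 from rfl,
        show PySem.Int.floordiv 4 2 = 2 from rfl, show PySem.Int.floordiv 5 2 = 2 from rfl,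
        show PySem.Int.mod 0 2 = 0 from rfl, show PySem.Int.mod 1 2 = 1 from rfl,
        show PySem.Int.mod 2 2 = 0 from rfl, show PySem.Int.mod 3 2 = 1 from rfl,
        show PySem.Int.mod 4 2 = 0 from rfl, show PySem.Int.mod 5 2 = 1 from rfl, reduceIte]
    -- ir = 0
    · by_cases hfix : (0 ≤ iy ∧ iy < H) ∧ (0 ≤ iz ∧ iz < D)
      · rw [main ix W (fun v => (v, iy, iz)) (by intro i; simp) (by intro v; simp; omega)]
        simp only [show PySem.Int.mod 0 2 = 0 from rfl, show PySem.Int.mod 1 2 = 1 from rfl,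
          show PySem.Int.mod 2 2 = 0 from rfl, show PySem.Int.mod 3 2 = 1 from rfl,
          show PySem.Int.mod 4 2 = 0 from rfl, show PySem.Int.mod 5 2 = 1 from rfl, reduceIte,
          hfix.1, hfix.2, and_self, decide_true, Bool.true_and, Bool.and_self]
        split_ifs <;> first | rfl | (simp only [decide_eq_false_iff_not, false_or] at *; omega)
      · rw [if_pos (Or.inl (by first | (split_ifs <;> simp only [Bool.and_eq_false_iff, decide_eq_false_iff_not] <;> tauto) | (simp only [Bool.and_eq_false_iff, decide_eq_false_iff_not]; tauto)))]
        by_cases hL : L ≤ 0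
        · exact pvLoopA_nil _ _ _ _ _ _ _ _ hL
        · rw [PySem.List.pyRange_one_cons (by omega : (0:Int) < L)]
          exact pvLoopA_stop W H D ix iy iz _ _ _ (ix + 0) iy iz (by first | rfl | simp) (by omega)
    -- ir = 1
    · by_cases hfix : (0 ≤ iy ∧ iy < H) ∧ (0 ≤ iz ∧ iz < D)
      · rw [main ix W (fun v => (v, iy, iz)) (by intro i; simp) (by intro v; simp; omega)]
        simp only [show PySem.Int.mod 0 2 = 0 from rfl, show PySem.Int.mod 1 2 = 1 from rfl,
          show PySem.Int.mod 2 2 = 0 from rfl, show PySem.Int.mod 3 2 = 1 from rfl,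
          show PySem.Int.mod 4 2 = 0 from rfl, show PySem.Int.mod 5 2 = 1 from rfl, reduceIte,
          hfix.1, hfix.2, and_self, decide_true, Bool.true_and, Bool.and_self]
        split_ifs <;> first | rfl | (simp only [decide_eq_false_iff_not, false_or] at *; omega)
      · rw [if_pos (Or.inl (by first | (split_ifs <;> simp only [Bool.and_eq_false_iff, decide_eq_false_iff_not] <;> tauto) | (simp only [Bool.and_eq_false_iff, decide_eq_false_iff_not]; tauto)))]
        by_cases hL : L ≤ 0
        · exact pvLoopA_nil _ _ _ _ _ _ _ _ hL
        · rw [PySem.List.pyRange_one_cons (by omega : (0:Int) < L)]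
          exact pvLoopA_stop W H D ix iy iz _ _ _ (ix - 0) iy iz (by first | rfl | simp) (by omega)
    -- ir = 2
    · by_cases hfix : (0 ≤ ix ∧ ix < W) ∧ (0 ≤ iz ∧ iz < D)
      · rw [main iy H (fun v => (ix, v, iz)) (by intro i; simp) (by intro v; simp; omega)]
        simp only [show PySem.Int.mod 0 2 = 0 from rfl, show PySem.Int.mod 1 2 = 1 from rfl,
          show PySem.Int.mod 2 2 = 0 from rfl, show PySem.Int.mod 3 2 = 1 from rfl,
          show PySem.Int.mod 4 2 = 0 from rfl, show PySem.Int.mod 5 2 = 1 from rfl, reduceIte,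
          hfix.1, hfix.2, and_self, decide_true, Bool.true_and, Bool.and_self]
        split_ifs <;> first | rfl | (simp only [decide_eq_false_iff_not, false_or] at *; omega)
      · rw [if_pos (Or.inl (by first | (split_ifs <;> simp only [Bool.and_eq_false_iff, decide_eq_false_iff_not] <;> tauto) | (simp only [Bool.and_eq_false_iff, decide_eq_false_iff_not]; tauto)))]
        by_cases hL : L ≤ 0
        · exact pvLoopA_nil _ _ _ _ _ _ _ _ hL
        · rw [PySem.List.pyRange_one_cons (by omega : (0:Int) < L)]
          exact pvLoopA_stop W H D ix iy iz _ _ _ ix (iy + 0) iz (by first | rfl | simp) (by omega)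
    -- ir = 3
    · by_cases hfix : (0 ≤ ix ∧ ix < W) ∧ (0 ≤ iz ∧ iz < D)
      · rw [main iy H (fun v => (ix, v, iz)) (by intro i; simp) (by intro v; simp; omega)]
        simp only [show PySem.Int.mod 0 2 = 0 from rfl, show PySem.Int.mod 1 2 = 1 from rfl,
          show PySem.Int.mod 2 2 = 0 from rfl, show PySem.Int.mod 3 2 = 1 from rfl,
          show PySem.Int.mod 4 2 = 0 from rfl, show PySem.Int.mod 5 2 = 1 from rfl, reduceIte,
          hfix.1, hfix.2, and_self, decide_true, Bool.true_and, Bool.and_self]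
        split_ifs <;> first | rfl | (simp only [decide_eq_false_iff_not, false_or] at *; omega)
      · rw [if_pos (Or.inl (by first | (split_ifs <;> simp only [Bool.and_eq_false_iff, decide_eq_false_iff_not] <;> tauto) | (simp only [Bool.and_eq_false_iff, decide_eq_false_iff_not]; tauto)))]
        by_cases hL : L ≤ 0
        · exact pvLoopA_nil _ _ _ _ _ _ _ _ hL
        · rw [PySem.List.pyRange_one_cons (by omega : (0:Int) < L)]
          exact pvLoopA_stop W H D ix iy iz _ _ _ ix (iy - 0) iz (by first | rfl | simp) (by omega)
    -- ir = 4
    · by_cases hfix : (0 ≤ ix ∧ ix < W) ∧ (0 ≤ iy ∧ iy < H)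
      · rw [main iz D (fun v => (ix, iy, v)) (by intro i; simp) (by intro v; simp; omega)]
        simp only [show PySem.Int.mod 0 2 = 0 from rfl, show PySem.Int.mod 1 2 = 1 from rfl,
          show PySem.Int.mod 2 2 = 0 from rfl, show PySem.Int.mod 3 2 = 1 from rfl,
          show PySem.Int.mod 4 2 = 0 from rfl, show PySem.Int.mod 5 2 = 1 from rfl, reduceIte,
          hfix.1, hfix.2, and_self, decide_true, Bool.true_and, Bool.and_self]
        split_ifs <;> first | rfl | (simp only [decide_eq_false_iff_not, false_or] at *; omega)
      · rw [if_pos (Or.inl (by first | (split_ifs <;> simp only [Bool.and_eq_false_iff, decide_eq_false_iff_not] <;> tauto) | (simp only [Bool.and_eq_false_iff, decide_eq_false_iff_not]; tauto)))]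
        by_cases hL : L ≤ 0
        · exact pvLoopA_nil _ _ _ _ _ _ _ _ hL
        · rw [PySem.List.pyRange_one_cons (by omega : (0:Int) < L)]
          exact pvLoopA_stop W H D ix iy iz _ _ _ ix iy (iz + 0) (by first | rfl | simp) (by omega)
    -- ir = 5
    · by_cases hfix : (0 ≤ ix ∧ ix < W) ∧ (0 ≤ iy ∧ iy < H)
      · rw [main iz D (fun v => (ix, iy, v)) (by intro i; simp) (by intro v; simp; omega)]
        simp only [show PySem.Int.mod 0 2 = 0 from rfl, show PySem.Int.mod 1 2 = 1 from rfl,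
          show PySem.Int.mod 2 2 = 0 from rfl, show PySem.Int.mod 3 2 = 1 from rfl,
          show PySem.Int.mod 4 2 = 0 from rfl, show PySem.Int.mod 5 2 = 1 from rfl, reduceIte,
          hfix.1, hfix.2, and_self, decide_true, Bool.true_and, Bool.and_self]
        split_ifs <;> first | rfl | (simp only [decide_eq_false_iff_not, false_or] at *; omega)
      · rw [if_pos (Or.inl (by first | (split_ifs <;> simp only [Bool.and_eq_false_iff, decide_eq_false_iff_not] <;> tauto) | (simp only [Bool.and_eq_false_iff, decide_eq_false_iff_not]; tauto)))]
        by_cases hL : L ≤ 0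
        · exact pvLoopA_nil _ _ _ _ _ _ _ _ hL
        · rw [PySem.List.pyRange_one_cons (by omega : (0:Int) < L)]
          exact pvLoopA_stop W H D ix iy iz _ _ _ ix iy (iz - 0) (by first | rfl | simp) (by omega)
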